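-- pv_equiv track=rewrite | github.com/FelixLuciano/Elements-of-Software-Design | source/185-Nota_das_escolas_de_samba.py | calcula_escola
-- ===== SOURCE A (Python) =====
-- def calcula_escola (issues):
--     final_score = 0
--
--     for points in issues:
--         score = 0
--
--         for point in points:
--             score += point
--
--         score -= min(points)
--         final_score += score
--
--     return final_score
-- ===== SOURCE B (Python) =====
-- def calcula_escola(issues):
--     if not issues:
--         return 0
--     ordered = sorted(issues[0])
--     return sum(ordered[1:]) + calcula_escola(issues[1:])
-- ===== Notes on version B (the rewrite author's own statement) =====
-- stated objective: alternative
-- what changed: Recursion over the issue list in which each issue's contribution is computed by sorting the issue and summing everything after the first (smallest) element, instead of A's iterative inner-sum-then-subtract-min accumulation.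
-- outside the precondition, e.g. on calcula_escola([[]]): A raises ValueError, B returns 0
import Mathlib
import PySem

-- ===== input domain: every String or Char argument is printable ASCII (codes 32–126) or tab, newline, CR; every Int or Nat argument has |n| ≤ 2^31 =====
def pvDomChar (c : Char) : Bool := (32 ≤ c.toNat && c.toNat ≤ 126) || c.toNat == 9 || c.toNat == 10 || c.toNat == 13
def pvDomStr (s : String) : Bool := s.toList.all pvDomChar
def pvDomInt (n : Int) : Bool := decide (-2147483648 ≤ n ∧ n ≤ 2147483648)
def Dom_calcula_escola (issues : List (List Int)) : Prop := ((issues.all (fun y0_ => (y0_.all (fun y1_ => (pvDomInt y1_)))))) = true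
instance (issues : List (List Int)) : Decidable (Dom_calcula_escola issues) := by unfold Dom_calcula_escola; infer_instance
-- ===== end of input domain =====

-- B recurses over the issue list, scoring each issue by sorting it and summing
-- everything after its first (smallest) element, instead of A's iterative
-- inner-sum-then-subtract-min accumulation; same O-class, different mechanism.

-- ===== PORT A =====
-- min(points) raises ValueError when an inner list has no elements; Pre_ excludes that, so
-- the .getD 0 default is never reached on admitted inputs.
def calcula_escola (issues : List (List Int)) : Int :=
  issues.foldl (fun final_score points =>
    let score := points.foldl (fun s p => s + p) 0
    let score := score - (PySem.List.min? points (fun x => x)).getD 0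
    final_score + score) 0

-- ===== PORT B =====
def calcula_escola_alt : List (List Int) → Int
  | [] => 0
  | first :: rest =>
    let ordered := PySem.List.sorted first (fun x => x) false
    (PySem.List.slice ordered (some 1) none).sum + calcula_escola_alt rest

-- ===== PRECONDITION & SPEC =====
-- Pre_ requires every inner list to be nonempty: min() raises ValueError otherwise.
def Pre_calcula_escola (issues : List (List Int)) : Prop :=
  ∀ ps ∈ issues, ps ≠ []
instance (issues : List (List Int)) : Decidable (Pre_calcula_escola issues) := by unfold Pre_calcula_escola; infer_instance
def pvWitness_calcula_escola : List (List Int) := [[10, 7, 9], [8, 8]]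

def Spec_calcula_escola (issues : List (List Int)) (out : Int) : Prop := out = calcula_escola_alt issues
instance (issues : List (List Int)) (out : Int) : Decidable (Spec_calcula_escola issues out) := by unfold Spec_calcula_escola; infer_instance

-- ===== CLAIM (what is proved, stated in full; the proofs are below) =====
def Claim_equal_calcula_escola : Prop := ∀ (issues : List (List Int)), Dom_calcula_escola issues → Pre_calcula_escola issues → Spec_calcula_escola issues (calcula_escola issues)

-- ===== LEMMAS AND PROOFS =====

-- One issue's score is the same in both programs: sum minus min = sum of the
-- sorted list after its head.
theorem pv_row (ps : List Int) (h : ps ≠ []) :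
    (PySem.List.slice (PySem.List.sorted ps (fun x => x) false) (some 1) none).sum
      = ps.foldl (fun s p => s + p) 0 - (PySem.List.min? ps (fun x => x)).getD 0 := by
  rw [PySem.List.slice_from_one]
  obtain ⟨m, t, hs⟩ : ∃ m t, PySem.List.sorted ps (fun x => x) false = m :: t := by
    rcases hq : PySem.List.sorted ps (fun x => x) false with _ | ⟨m, t⟩
    · exact absurd ((PySem.List.sorted_eq_nil_iff _ _ _).mp hq) h
    · exact ⟨m, t, rfl⟩
  obtain ⟨m', hm'⟩ : ∃ m', PySem.List.min? ps (fun x => x) = some m' := by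
    rcases hq : PySem.List.min? ps (fun x => x) with _ | m'
    · exact absurd ((PySem.List.min?_eq_none_iff _ _).mp hq) h
    · exact ⟨m', rfl⟩
  have hperm : (m :: t).Perm ps := hs ▸ PySem.List.sorted_perm ps (fun x => x) false
  have hsum : m + t.sum = ps.sum := by simpa using hperm.sum_eq
  have hmem : m ∈ ps := hperm.mem_iff.mp (List.mem_cons_self)
  have hm'mem : m' ∈ ps := PySem.List.min?_mem hm'
  have h1 : m' ≤ m := PySem.List.min?_isMin hm' m hmem
  have h2 : m ≤ m' := PySem.List.key_head_sorted_le ps (fun x => x) hs m' hm'mem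
  have hfold : ps.foldl (fun s p => s + p) 0 = ps.sum := by
    simpa using PySem.List.foldl_add ps (fun p => p) 0
  rw [hs, hm', hfold, List.tail_cons, Option.getD_some]
  omega

theorem pv_key (issues : List (List Int)) (acc : Int) (h : ∀ ps ∈ issues, ps ≠ []) :
    issues.foldl (fun final_score points =>
      let score := points.foldl (fun s p => s + p) 0
      let score := score - (PySem.List.min? points (fun x => x)).getD 0
      final_score + score) acc
    = acc + calcula_escola_alt issues := by
  induction issues generalizing acc with
  | nil => simp [calcula_escola_alt]
  | cons ps t ih =>
    simp only [List.foldl_cons]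
    rw [ih _ (fun q hq => h q (List.mem_cons_of_mem _ hq)), calcula_escola_alt,
      pv_row ps (h ps List.mem_cons_self)]
    ring

-- ===== VERDICT (by name: the statement is the Claim_ definition above) =====
theorem calcula_escola_spec : Claim_equal_calcula_escola := by
  intro issues _ hpre
  unfold Spec_calcula_escola calcula_escola
  rw [pv_key issues 0 hpre]
  ring
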